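-- pv_equiv track=rewrite | github.com/xpessoles/Informatique | P_05_AlgorithmiqueProgrammation/DS_03_TempsReponse2/DS_03_TempsReponse2/old/Ressources/x_psi_2016_correction/x_psi_2016_partie_IV_-_fusionne.py | scm
-- ===== SOURCE A (Python) =====
-- def scm(s):
--     r = []
--     d, f = 0, 0
--     for i in range(len(s)-1):
--         if s[i] <= s[i+1]:
--             f += 1
--         else:
--             r.append((d,f))
--             d = f = f+1
--     r.append((d,f))
--     return r
-- ===== SOURCE B (Python) =====
-- def scm(s):
--     if not s:
--         return []
--     bounds = [i + 1 for i in range(len(s) - 1) if s[i] > s[i + 1]]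
--     starts = [0] + bounds
--     ends = [b - 1 for b in bounds] + [len(s) - 1]
--     return list(zip(starts, ends))
-- ===== Notes on version B (the rewrite author's own statement) =====
-- stated objective: alternative
-- what changed: B computes the descent boundary positions in one comprehension and then zips a starts list with an ends list, instead of A's single loop threading a running (d, f) accumulator and appending runs as it goes.
-- intended difference: On the empty list A returns [(0, 0)], a run naming a nonexistent index 0; B returns [], the intended answer since an empty sequence has no runs. — e.g. on scm([]): A returns [(0, 0)], B returns []
import Mathlib
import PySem

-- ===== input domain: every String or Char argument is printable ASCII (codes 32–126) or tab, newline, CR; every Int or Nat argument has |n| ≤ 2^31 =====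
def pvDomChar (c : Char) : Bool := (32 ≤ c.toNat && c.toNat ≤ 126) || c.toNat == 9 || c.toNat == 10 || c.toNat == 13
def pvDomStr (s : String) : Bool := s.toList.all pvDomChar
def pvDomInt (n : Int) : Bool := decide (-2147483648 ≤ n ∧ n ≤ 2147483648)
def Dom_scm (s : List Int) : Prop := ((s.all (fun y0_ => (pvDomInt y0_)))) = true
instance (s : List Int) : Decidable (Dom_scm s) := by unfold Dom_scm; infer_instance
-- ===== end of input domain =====

-- B replaces A's running (d, f) accumulator loop with a descent-boundary table zipped
-- into runs in a second pass; on the empty list B returns [] where A returns [(0, 0)].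

-- ===== PORT A =====
-- loop body of A: state (r, d, f); indices are always in range, so s[i] is s.getD i 0 (exact here)
def scmStep (s : List Int) (st : List (Int × Int) × Int × Int) (i : Nat) : List (Int × Int) × Int × Int :=
  if s.getD i 0 ≤ s.getD (i+1) 0 then (st.1, st.2.1, st.2.2 + 1)
  else (st.1 ++ [(st.2.1, st.2.2)], st.2.2 + 1, st.2.2 + 1)

def scm (s : List Int) : List (Int × Int) :=
  let res := (List.range (s.length - 1)).foldl (scmStep s) ([], 0, 0)
  res.1 ++ [(res.2.1, res.2.2)]

-- ===== PORT B =====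
def scm_alt (s : List Int) : List (Int × Int) :=
  if s = [] then []
  else
    let bounds := ((List.range (s.length - 1)).filter
        (fun i => decide (s.getD (i+1) 0 < s.getD i 0))).map (fun (i : Nat) => (i : Int) + 1)
    let starts := 0 :: bounds
    let ends := bounds.map (fun b => b - 1) ++ [(s.length : Int) - 1]
    starts.zip ends

-- ===== PRECONDITION & SPEC =====
-- On the empty list A returns [(0, 0)], a run naming a nonexistent index 0; B returns [],
-- the intended answer since an empty sequence has no runs.
def D_scm (s : List Int) : Prop := s = []
instance (s : List Int) : Decidable (D_scm s) := by unfold D_scm; infer_instance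

def Spec_scm (s : List Int) (out : List (Int × Int)) : Prop := ¬ D_scm s → out = scm_alt s
instance (s : List Int) (out : List (Int × Int)) : Decidable (Spec_scm s out) := by unfold Spec_scm; infer_instance

def pvDiffWitness_scm : List Int := []
def pvDiffWitnessOut_scm : (List (Int × Int)) × (List (Int × Int)) := ([(0, 0)], [])

-- ===== CLAIM (what is proved, stated in full; the proofs are below) =====
def Claim_unchanged_scm : Prop := ∀ (s : List Int), Dom_scm s → Spec_scm s (scm s)
def Claim_changed_scm : Prop := Dom_scm (pvDiffWitness_scm) ∧ D_scm (pvDiffWitness_scm) ∧ scm (pvDiffWitness_scm) = pvDiffWitnessOut_scm.1 ∧ scm_alt (pvDiffWitness_scm) = pvDiffWitnessOut_scm.2 ∧ pvDiffWitnessOut_scm.1 ≠ pvDiffWitnessOut_scm.2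
def Claim_exact_scm : Prop := ∀ (s : List Int), Dom_scm s → D_scm s → scm s ≠ scm_alt s

-- ===== LEMMAS AND PROOFS =====

-- the list of runs with start d0, internal boundaries right after each element of D, final end `last`
def runsFrom (d0 : Int) (D : List Int) (last : Int) : List (Int × Int) :=
  match D with
  | [] => [(d0, last)]
  | i :: rest => (d0, i) :: runsFrom (i + 1) rest last

theorem zip_runsFrom (D : List Int) (d0 last : Int) :
    (d0 :: D.map (fun i => i + 1)).zip (D ++ [last]) = runsFrom d0 D last := by
  induction D generalizing d0 with
  | nil => simp [runsFrom]
  | cons i rest ih => simp [runsFrom, ih (i + 1)]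

theorem foldl_scmStep (s : List Int) (k : Nat) : ∀ (j : Nat) (r0 : List (Int × Int)) (d0 : Int),
    (let res := (List.range' j k).foldl (scmStep s) (r0, d0, (j : Int));
     res.1 ++ [(res.2.1, res.2.2)]) =
    r0 ++ runsFrom d0 (((List.range' j k).filter
        (fun i => decide (s.getD (i+1) 0 < s.getD i 0))).map (fun i => Int.ofNat i)) ((j : Int) + k) := by
  induction k with
  | zero => intro j r0 d0; simp [runsFrom]
  | succ k ih =>
    intro j r0 d0
    rw [List.range'_succ]
    by_cases h : s.getD j 0 ≤ s.getD (j+1) 0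
    · have hstep : scmStep s (r0, d0, (j : Int)) j = (r0, d0, ((j+1 : Nat) : Int)) := by
        unfold scmStep
        rw [if_pos h, Nat.cast_add, Nat.cast_one]
      have hfl : (j :: List.range' (j+1) k).filter (fun i => decide (s.getD (i+1) 0 < s.getD i 0))
          = (List.range' (j+1) k).filter (fun i => decide (s.getD (i+1) 0 < s.getD i 0)) := by
        rw [List.filter_cons_of_neg]
        simpa using not_lt.mpr h
      simp only [List.foldl_cons]
      rw [hstep, ih (j+1) r0 d0, hfl]
      have hc : ((j + 1 : Nat) : Int) + (k : Nat) = (j : Int) + ((k + 1 : Nat) : Int) := by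
        push_cast; ring
      rw [hc]
    · have h' : s.getD (j+1) 0 < s.getD j 0 := lt_of_not_ge h
      have hstep : scmStep s (r0, d0, (j : Int)) j
          = (r0 ++ [(d0, (j : Int))], ((j+1 : Nat) : Int), ((j+1 : Nat) : Int)) := by
        unfold scmStep
        rw [if_neg h, Nat.cast_add, Nat.cast_one]
      have hfl : (j :: List.range' (j+1) k).filter (fun i => decide (s.getD (i+1) 0 < s.getD i 0))
          = j :: (List.range' (j+1) k).filter (fun i => decide (s.getD (i+1) 0 < s.getD i 0)) := by
        rw [List.filter_cons_of_pos]
        simpa using h'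
      simp only [List.foldl_cons]
      rw [hstep, ih (j+1) (r0 ++ [(d0, (j : Int))]) ((j+1 : Nat) : Int), hfl]
      simp only [List.map_cons, runsFrom, List.append_assoc, List.cons_append, List.nil_append,
        Int.ofNat_eq_natCast]
      have hc : ((j + 1 : Nat) : Int) + (k : Nat) = (j : Int) + ((k + 1 : Nat) : Int) := by
        push_cast; ring
      rw [hc, Nat.cast_add, Nat.cast_one]

theorem scm_eq_runs (s : List Int) (hs : s ≠ []) :
    scm s = runsFrom 0 (((List.range (s.length - 1)).filter
        (fun i => decide (s.getD (i+1) 0 < s.getD i 0))).map (fun i => Int.ofNat i))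
        ((s.length : Int) - 1) := by
  have h := foldl_scmStep s (s.length - 1) 0 [] 0
  simp only [Nat.cast_zero, zero_add, List.nil_append] at h
  unfold scm
  simp only [List.range_eq_range']
  rw [h]
  have hn : 1 ≤ s.length := List.length_pos_iff.mpr hs
  congr 1
  omega

theorem scm_alt_eq_runs (s : List Int) (hs : s ≠ []) :
    scm_alt s = runsFrom 0 (((List.range (s.length - 1)).filter
        (fun i => decide (s.getD (i+1) 0 < s.getD i 0))).map (fun i => Int.ofNat i))
        ((s.length : Int) - 1) := by
  unfold scm_alt
  rw [if_neg hs]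
  rw [← zip_runsFrom]
  simp [List.map_map, Function.comp_def, add_sub_cancel_right, Int.ofNat_eq_natCast]

-- ===== VERDICT (by name: the statement is the Claim_ definition above) =====
theorem scm_spec : Claim_unchanged_scm := by
  intro s _ hD
  have hs : s ≠ [] := hD
  unfold Spec_scm at *
  rw [scm_eq_runs s hs, scm_alt_eq_runs s hs]

theorem scm_changed : Claim_changed_scm := by unfold Claim_changed_scm; decide

theorem scm_tight : Claim_exact_scm := by
  intro s _ hD
  subst hD
  decide
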